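-- pv_equiv track=rewrite | github.com/CRISHFAS/Calculating-the-Document-Distance | docdist1.py | obtener_palabras_de_cadena
-- ===== SOURCE A (Python) =====
-- def obtener_palabras_de_cadena(linea):
--     """
--     Devolver una lista de las palabras en la cadena de entrada dada,
--     convirtiendo cada palabra a minúsculas.
--
--     Entrada:  linea (una cadena)
--     Salida: una lista de cadenas
--               (cada cadena es una secuencia de caracteres alfanuméricos)
--     """
--     lista_palabras = []          # acumula palabras en la línea
--     lista_caracteres = []     # acumula caracteres en la palabra
--     for c in linea:
--         if c.isalnum():
--             lista_caracteres.append(c)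
--         elif len(lista_caracteres) > 0:
--             palabra = "".join(lista_caracteres)
--             palabra = palabra.lower()
--             lista_palabras.append(palabra)
--             lista_caracteres = []
--     if len(lista_caracteres) > 0:
--         palabra = "".join(lista_caracteres)
--         palabra = palabra.lower()
--         lista_palabras.append(palabra)
--     return lista_palabras
-- ===== SOURCE B (Python) =====
-- def obtener_palabras_de_cadena(linea):
--     """Lista de palabras (secuencias alfanumericas) en minusculas."""
--     palabras = []
--     resto = linea
--     while resto:
--         if resto[0].isalnum():
--             j = 1
--             while j < len(resto) and resto[j].isalnum():
--                 j += 1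
--             palabras.append(resto[:j].lower())
--             resto = resto[j:]
--         else:
--             resto = resto[1:]
--     return palabras
-- ===== Notes on version B (the rewrite author's own statement) =====
-- stated objective: alternative
-- what changed: Replaces the per-character accumulator-and-flush state machine (with its duplicated final-flush block) by a run-scanning loop over the remaining suffix: at each alphanumeric position it scans the whole run at once, slices and lowercases it, and drops the consumed prefix.
import Mathlib
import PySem

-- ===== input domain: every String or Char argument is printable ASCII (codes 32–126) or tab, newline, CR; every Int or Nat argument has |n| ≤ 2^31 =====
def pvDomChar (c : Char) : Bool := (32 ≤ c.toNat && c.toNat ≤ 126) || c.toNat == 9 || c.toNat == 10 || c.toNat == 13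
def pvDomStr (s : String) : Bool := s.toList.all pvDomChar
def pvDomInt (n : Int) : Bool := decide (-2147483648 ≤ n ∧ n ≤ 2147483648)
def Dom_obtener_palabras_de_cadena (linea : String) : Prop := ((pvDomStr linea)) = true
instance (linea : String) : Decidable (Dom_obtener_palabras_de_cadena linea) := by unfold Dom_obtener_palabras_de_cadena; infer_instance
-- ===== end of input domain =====

-- B replaces A's per-character accumulator/flush state machine by a run-scanning
-- loop (scan each alphanumeric run at once, lowercase it, drop the consumed prefix);
-- objective: alternative decomposition, same output.

-- ===== PORT A =====
-- the loop body of A: state = (lista_palabras, lista_caracteres)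
def pvStepA (st : List String × List Char) (c : Char) : List String × List Char :=
  if PySem.Chars.isalnum c then (st.1, st.2 ++ [c])
  else if st.2.length > 0 then (st.1 ++ [PySem.Str.lower (String.ofList st.2)], [])
  else st

def obtener_palabras_de_cadena (linea : String) : List String :=
  let st := linea.toList.foldl pvStepA ([], [])
  if st.2.length > 0 then st.1 ++ [PySem.Str.lower (String.ofList st.2)] else st.1

-- ===== PORT B =====
-- the outer while loop of B over the remaining suffix `resto`; the inner
-- `while`/slices become takeWhile/dropWhile over the rest of the suffix
def pvGoB : List Char → List String
  | [] => []
  | c :: rest =>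
    if PySem.Chars.isalnum c then
      PySem.Str.lower (String.ofList (c :: rest.takeWhile PySem.Chars.isalnum)) ::
        pvGoB (rest.dropWhile PySem.Chars.isalnum)
    else pvGoB rest
termination_by l => l.length
decreasing_by
  · simpa using Nat.lt_succ_of_le (List.length_dropWhile_le _ _)
  · simp

def obtener_palabras_de_cadena_alt (linea : String) : List String :=
  pvGoB linea.toList

-- ===== PRECONDITION & SPEC =====
def Spec_obtener_palabras_de_cadena (linea : String) (out : List String) : Prop := out = obtener_palabras_de_cadena_alt linea
instance (linea : String) (out : List String) : Decidable (Spec_obtener_palabras_de_cadena linea out) := by unfold Spec_obtener_palabras_de_cadena; infer_instance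

-- ===== CLAIM (what is proved, stated in full; the proofs are below) =====
def Claim_equal_obtener_palabras_de_cadena : Prop := ∀ (linea : String), Dom_obtener_palabras_de_cadena linea → Spec_obtener_palabras_de_cadena linea (obtener_palabras_de_cadena linea)

-- ===== LEMMAS AND PROOFS =====

-- common reference recursion: A's pending accumulator made explicit
def pvSpec : List Char → List Char → List String
  | acc, [] => if acc = [] then [] else [PySem.Str.lower (String.ofList acc)]
  | acc, c :: cs =>
    if PySem.Chars.isalnum c then pvSpec (acc ++ [c]) cs
    else if acc = [] then pvSpec [] cs
    else PySem.Str.lower (String.ofList acc) :: pvSpec [] cs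

theorem pvFoldA_eq (cs : List Char) : ∀ (words : List String) (acc : List Char),
    (let st := cs.foldl pvStepA (words, acc);
     if st.2.length > 0 then st.1 ++ [PySem.Str.lower (String.ofList st.2)] else st.1)
    = words ++ pvSpec acc cs := by
  induction cs with
  | nil =>
    intro words acc
    simp only [List.foldl_nil, pvSpec]
    rcases acc with _ | ⟨a, as⟩ <;> simp
  | cons c cs ih =>
    intro words acc
    simp only [List.foldl_cons, pvStepA, pvSpec]
    by_cases h : PySem.Chars.isalnum c = true
    · simp [h, ih]
    · rcases acc with _ | ⟨a, as⟩
      · simp [h, ih]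
      · simp [h, ih]

theorem pvSpec_pending (rest : List Char) : ∀ (acc : List Char), acc ≠ [] →
    pvSpec acc rest =
      PySem.Str.lower (String.ofList (acc ++ rest.takeWhile PySem.Chars.isalnum)) ::
        pvSpec [] (rest.dropWhile PySem.Chars.isalnum) := by
  induction rest with
  | nil => intro acc h; simp [pvSpec, h]
  | cons d ds ih =>
    intro acc h
    by_cases hd : PySem.Chars.isalnum d = true
    · simp only [pvSpec, hd, if_pos, List.takeWhile_cons_of_pos hd, List.dropWhile_cons_of_pos hd]
      rw [ih (acc ++ [d]) (by simp)]
      simp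
    · simp [pvSpec, hd, h, List.takeWhile_cons_of_neg hd, List.dropWhile_cons_of_neg hd]

theorem pvSpec_nil_eq_goB (cs : List Char) : pvSpec [] cs = pvGoB cs := by
  induction cs using pvGoB.induct with
  | case1 => simp [pvSpec, pvGoB]
  | case2 c rest h ih =>
    rw [pvGoB, if_pos h]
    rw [show pvSpec [] (c :: rest) = pvSpec [c] rest by simp [pvSpec, h]]
    rw [pvSpec_pending rest [c] (by simp)]
    simp [ih]
  | case3 c rest h ih =>
    rw [pvGoB, if_neg h]
    simp [pvSpec, h, ih]

-- ===== VERDICT (by name: the statement is the Claim_ definition above) =====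
theorem obtener_palabras_de_cadena_spec : Claim_equal_obtener_palabras_de_cadena := by
  intro linea _
  unfold Spec_obtener_palabras_de_cadena obtener_palabras_de_cadena obtener_palabras_de_cadena_alt
  rw [pvFoldA_eq, pvSpec_nil_eq_goB]
  simp
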